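-- pv_equiv track=rewrite | github.com/katrinafyi/codejam-2019 | 07_widdershins_attempt1_score1.0.py | widdershins
-- ===== SOURCE A (Python) =====
-- letters = ['A', 'B', 'D', 'C']
--
-- def letter(l):
--     return letters[l%4]
--
-- def square_spiral(n, first, x, y):
--     d = {}
--
--     for i in range(n-1):
--         d[0, i] = letter(first)
--         d[i, n-1] = letter(first+1)
--         d[n-1, i+1] = letter(first+2)
--         d[i+1, 0] = letter(first+3)
--     return {(x+k[0], y+k[1]): v for k, v in d.items()}
--
-- def widdershins(n):
--     from collections import defaultdict
--     d = defaultdict(lambda: ' ')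
--
--     for i in range(int(n/2)):
--         d.update(square_spiral(n-2*i, -i, i, i))
--
--     if n % 2 == 1:
--         d[int(n/2), int(n/2)] = 'Z'
--
--     s = ''
--     for r in range(n):
--         for c in range(n):
--             s += (d[r,c])
--         s += '\n'
--     return s
-- ===== SOURCE B (Python) =====
-- letters = ['A', 'B', 'D', 'C']
--
-- def letter(l):
--     return letters[l % 4]
--
-- def cell(n, r, c):
--     # ring index and local coordinates inside that ring's square
--     i = min(r, c, n - 1 - r, n - 1 - c)
--     m = n - 2 * i
--     lr, lc = r - i, c - i
--     if m == 1:
--         return 'Z'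
--     if lr == 0 and lc <= m - 2:
--         return letter(-i)
--     if lc == m - 1 and lr <= m - 2:
--         return letter(-i + 1)
--     if lr == m - 1 and lc >= 1:
--         return letter(-i + 2)
--     return letter(-i + 3)
--
-- def widdershins(n):
--     return ''.join(
--         ''.join(cell(n, r, c) for c in range(n)) + '\n' for r in range(n))
-- ===== Notes on version B (the rewrite author's own statement) =====
-- stated objective: alternative
-- what changed: B drops A's dict-of-nested-spirals construction (a defaultdict filled by one dict per ring, built key by key and re-keyed by a shift comprehension) and instead computes each output character directly from its coordinates: ring index i = min(r, c, n-1-r, n-1-c) and the side within that ring pick the letter.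
import Mathlib
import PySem

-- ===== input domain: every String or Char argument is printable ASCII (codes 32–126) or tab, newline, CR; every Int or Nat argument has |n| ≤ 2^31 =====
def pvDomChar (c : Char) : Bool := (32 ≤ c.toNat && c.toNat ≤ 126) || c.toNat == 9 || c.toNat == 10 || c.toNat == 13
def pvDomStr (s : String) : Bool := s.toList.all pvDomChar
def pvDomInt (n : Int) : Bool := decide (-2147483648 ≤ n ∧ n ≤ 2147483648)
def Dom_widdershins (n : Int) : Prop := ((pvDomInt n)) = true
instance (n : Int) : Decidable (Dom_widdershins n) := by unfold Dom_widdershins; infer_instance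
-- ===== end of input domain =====

-- B replaces A's layered dict-of-spirals construction by a direct per-cell ring formula
-- (ring index i = min distance to the border), same O(n^2) output built cell by cell.

-- ===== PORT A =====
def lettersA : List String := ["A", "B", "D", "C"]

def letterA (l : Int) : String :=
  -- letters[l % 4]: the index is always in range, so the .getD default is never used
  (PySem.List.pyGet? lettersA (PySem.Int.mod l 4)).getD ""

def square_spiral (n first x y : Int) : PySem.Dict (Int × Int) String :=
  let d : PySem.Dict (Int × Int) String :=
    (PySem.List.pyRange 0 (n - 1) 1).foldl (fun d i =>
      (((d.insert (0, i) (letterA first)).insert (i, n - 1) (letterA (first + 1))).insert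
        (n - 1, i + 1) (letterA (first + 2))).insert (i + 1, 0) (letterA (first + 3)))
      PySem.Dict.empty
  PySem.Dict.ofList (d.items.map (fun kv => ((x + kv.1.1, y + kv.1.2), kv.2)))

def widdershins (n : Int) : String :=
  -- defaultdict(lambda: ' ') : every key is read at most once, so d[k] is d.getD k " "
  let d : PySem.Dict (Int × Int) String :=
    (PySem.List.pyRange 0 (PySem.Int.truncdiv n 2) 1).foldl
      (fun d i => d.update (square_spiral (n - 2 * i) (-i) i i).items) PySem.Dict.empty
  let d := if PySem.Int.mod n 2 = 1
           then d.insert (PySem.Int.truncdiv n 2, PySem.Int.truncdiv n 2) "Z" else d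
  (PySem.List.pyRange 0 n 1).foldl (fun s r =>
    ((PySem.List.pyRange 0 n 1).foldl (fun s c => s ++ d.getD (r, c) " ") s) ++ "\n") ""

-- ===== PORT B =====
def lettersB : List String := ["A", "B", "D", "C"]

def letterB (l : Int) : String :=
  (PySem.List.pyGet? lettersB (PySem.Int.mod l 4)).getD ""

def cellB (n r c : Int) : String :=
  let i := min (min r c) (min (n - 1 - r) (n - 1 - c))
  let m := n - 2 * i
  let lr := r - i
  let lc := c - i
  if m = 1 then "Z"
  else if lr = 0 ∧ lc ≤ m - 2 then letterB (-i)
  else if lc = m - 1 ∧ lr ≤ m - 2 then letterB (-i + 1)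
  else if lr = m - 1 ∧ 1 ≤ lc then letterB (-i + 2)
  else letterB (-i + 3)

def widdershins_alt (n : Int) : String :=
  PySem.Str.join "" ((PySem.List.pyRange 0 n 1).map (fun r =>
    PySem.Str.join "" ((PySem.List.pyRange 0 n 1).map (fun c => cellB n r c)) ++ "\n"))

-- ===== PRECONDITION & SPEC =====
def Spec_widdershins (n : Int) (out : String) : Prop := out = widdershins_alt n
instance (n : Int) (out : String) : Decidable (Spec_widdershins n out) := by unfold Spec_widdershins; infer_instance

-- ===== CLAIM (what is proved, stated in full; the proofs are below) =====
def Claim_equal_widdershins : Prop := ∀ (n : Int), Dom_widdershins n → Spec_widdershins n (widdershins n)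

-- ===== LEMMAS AND PROOFS =====

-- proof-side vocabulary
def sideVal (first m p q : Int) : String :=
  if p = 0 ∧ q ≤ m - 2 then letterA first
  else if q = m - 1 ∧ p ≤ m - 2 then letterA (first + 1)
  else if p = m - 1 ∧ 1 ≤ q then letterA (first + 2)
  else letterA (first + 3)

def onBorder (m p q : Int) : Prop :=
  0 ≤ p ∧ p < m ∧ 0 ≤ q ∧ q < m ∧ (p = 0 ∨ q = 0 ∨ p = m - 1 ∨ q = m - 1)

def quadItems (m first : Int) : List ((Int × Int) × String) :=
  (PySem.List.pyRange 0 (m - 1) 1).flatMap (fun i =>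
    [((0, i), letterA first), ((i, m - 1), letterA (first + 1)),
     ((m - 1, i + 1), letterA (first + 2)), ((i + 1, 0), letterA (first + 3))])

def mainItems (n t : Int) : List ((Int × Int) × String) :=
  (PySem.List.pyRange 0 t 1).flatMap (fun i => (square_spiral (n - 2 * i) (-i) i i).items)

theorem foldl_flatMap_insert {α : Type} (l : List α) (g : α → List ((Int × Int) × String))
    (d : PySem.Dict (Int × Int) String) :
    (l.flatMap g).foldl (fun d p => d.insert p.1 p.2) d
      = l.foldl (fun d a => (g a).foldl (fun d p => d.insert p.1 p.2) d) d := by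
  induction l generalizing d with
  | nil => rfl
  | cons a l ih => simp [List.flatMap_cons, List.foldl_append, ih]

theorem mem_quadKeys (m first a b : Int) :
    ((a, b) ∈ (quadItems m first).map Prod.fst) ↔
      ((a = 0 ∧ 0 ≤ b ∧ b ≤ m - 2) ∨ (b = m - 1 ∧ 0 ≤ a ∧ a ≤ m - 2) ∨
       (a = m - 1 ∧ 1 ≤ b ∧ b ≤ m - 1) ∨ (b = 0 ∧ 1 ≤ a ∧ a ≤ m - 1)) := by
  simp only [quadItems, List.map_flatMap, List.mem_flatMap, PySem.List.mem_pyRange_one,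
    List.map_cons, List.map_nil, List.mem_cons, List.not_mem_nil, or_false, Prod.mk.injEq]
  constructor
  · rintro ⟨i, ⟨h0, h1⟩, h⟩
    rcases h with ⟨ha, hb⟩ | ⟨ha, hb⟩ | ⟨ha, hb⟩ | ⟨ha, hb⟩ <;> omega
  · rintro (⟨ha, hb0, hb1⟩ | ⟨hb, ha0, ha1⟩ | ⟨ha, hb0, hb1⟩ | ⟨hb, ha0, ha1⟩)
    · exact ⟨b, by omega, Or.inl ⟨by omega, rfl⟩⟩
    · exact ⟨a, by omega, Or.inr (Or.inl ⟨rfl, by omega⟩)⟩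
    · exact ⟨b - 1, by omega, Or.inr (Or.inr (Or.inl ⟨by omega, by omega⟩))⟩
    · exact ⟨a - 1, by omega, Or.inr (Or.inr (Or.inr ⟨by omega, by omega⟩))⟩

theorem quadItems_val (m first : Int) (hm : 2 ≤ m) :
    ∀ p ∈ quadItems m first, p.2 = sideVal first m p.1.1 p.1.2 := by
  intro p hp
  simp only [quadItems, List.mem_flatMap, PySem.List.mem_pyRange_one, List.mem_cons,
    List.not_mem_nil, or_false] at hp
  obtain ⟨i, ⟨h0, h1⟩, hp⟩ := hp
  rcases hp with rfl | rfl | rfl | rfl <;>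
    · dsimp only
      simp only [sideVal]
      split_ifs <;> first | rfl | omega | (simp only [true_and] at *; omega)

theorem quadKeys_nodup (m first : Int) : ((quadItems m first).map Prod.fst).Nodup := by
  simp only [quadItems, List.map_flatMap]
  rw [List.nodup_flatMap]
  constructor
  · intro i hi
    rw [PySem.List.mem_pyRange_one] at hi
    simp [Prod.ext_iff]
    omega
  · apply (PySem.List.pairwise_lt_pyRange_one 0 (m-1)).imp_of_mem
    intro i j hi hj hij
    rw [PySem.List.mem_pyRange_one] at hi hj
    intro p hp hq
    simp only [List.map_cons, List.map_nil, List.mem_cons, List.not_mem_nil, or_false] at hp hq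
    obtain ⟨p1, p2⟩ := p
    simp only [Prod.mk.injEq] at hp hq
    rcases hp with ⟨h1,h2⟩|⟨h1,h2⟩|⟨h1,h2⟩|⟨h1,h2⟩ <;>
      rcases hq with ⟨g1,g2⟩|⟨g1,g2⟩|⟨g1,g2⟩|⟨g1,g2⟩ <;> omega

theorem inner_fold_items (m first : Int) :
    ((PySem.List.pyRange 0 (m - 1) 1).foldl (fun d i =>
      (((d.insert (0, i) (letterA first)).insert (i, m - 1) (letterA (first + 1))).insert
        (m - 1, i + 1) (letterA (first + 2))).insert (i + 1, 0) (letterA (first + 3)))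
      PySem.Dict.empty).items = quadItems m first := by
  have h : ((PySem.List.pyRange 0 (m - 1) 1).foldl (fun d i =>
      (((d.insert (0, i) (letterA first)).insert (i, m - 1) (letterA (first + 1))).insert
        (m - 1, i + 1) (letterA (first + 2))).insert (i + 1, 0) (letterA (first + 3)))
      PySem.Dict.empty)
      = (quadItems m first).foldl (fun d p => d.insert p.1 p.2) PySem.Dict.empty := by
    rw [quadItems, foldl_flatMap_insert]; rfl
  rw [h, PySem.Dict.items_foldl_insert_fresh (quadItems m first) Prod.fst Prod.snd
    PySem.Dict.empty (fun a _ => PySem.Dict.contains_empty _) (quadKeys_nodup m first)]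
  show PySem.Dict.empty.items ++ _ = _
  rw [show (PySem.Dict.empty : PySem.Dict (Int × Int) String).items = [] from rfl]
  simp

theorem spiral_items (m first x y : Int) :
    (square_spiral m first x y).items
      = (quadItems m first).map (fun p => ((x + p.1.1, y + p.1.2), p.2)) := by
  show (PySem.Dict.ofList _).items = _
  rw [inner_fold_items]
  have hfresh : ∀ a ∈ (quadItems m first).map (fun p => ((x + p.1.1, y + p.1.2), p.2)),
      (PySem.Dict.empty : PySem.Dict (Int × Int) String).contains a.1 = false :=
    fun a _ => PySem.Dict.contains_empty _
  have hnd : (((quadItems m first).map (fun p => ((x + p.1.1, y + p.1.2), p.2))).map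
      Prod.fst).Nodup := by
    have : (((quadItems m first).map (fun p => ((x + p.1.1, y + p.1.2), p.2))).map Prod.fst)
        = ((quadItems m first).map Prod.fst).map (fun k => (x + k.1, y + k.2)) := by
      simp [List.map_map]
    rw [this]
    apply (quadKeys_nodup m first).map
    intro u v huv
    obtain ⟨u1, u2⟩ := u; obtain ⟨v1, v2⟩ := v
    simp only [Prod.mk.injEq] at huv ⊢
    omega
  have := PySem.Dict.items_foldl_insert_fresh
    ((quadItems m first).map (fun p => ((x + p.1.1, y + p.1.2), p.2))) Prod.fst Prod.snd
    PySem.Dict.empty hfresh hnd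
  simpa [PySem.Dict.items, PySem.Dict.ofList] using this

theorem spiral_keys_nodup (m first x y : Int) :
    ((square_spiral m first x y).items.map Prod.fst).Nodup := by
  rw [spiral_items]
  have : (((quadItems m first).map (fun p => ((x + p.1.1, y + p.1.2), p.2))).map Prod.fst)
      = ((quadItems m first).map Prod.fst).map (fun k => (x + k.1, y + k.2)) := by
    simp [List.map_map]
  rw [this]
  apply (quadKeys_nodup m first).map
  intro u v huv
  obtain ⟨u1, u2⟩ := u; obtain ⟨v1, v2⟩ := v
  simp only [Prod.mk.injEq] at huv ⊢
  omega

theorem mem_spiral_keys (m first x y a b : Int) (hm : 2 ≤ m) :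
    ((a, b) ∈ (square_spiral m first x y).items.map Prod.fst) ↔ onBorder m (a - x) (b - y) := by
  rw [spiral_items]
  have hcomp : (((quadItems m first).map (fun p => ((x + p.1.1, y + p.1.2), p.2))).map Prod.fst)
      = ((quadItems m first).map Prod.fst).map (fun k => (x + k.1, y + k.2)) := by
    simp [List.map_map]
  rw [hcomp]
  constructor
  · intro h
    obtain ⟨⟨k1, k2⟩, hk, hke⟩ := List.mem_map.mp h
    rw [mem_quadKeys] at hk
    simp only [Prod.mk.injEq] at hke
    unfold onBorder
    omega
  · intro h
    refine List.mem_map.mpr ⟨(a - x, b - y), ?_, by simp only [Prod.mk.injEq]; omega⟩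
    rw [mem_quadKeys]
    unfold onBorder at h
    omega

theorem mainItems_eq_fold (n t : Int) :
    ((PySem.List.pyRange 0 t 1).foldl
        (fun d i => d.update (square_spiral (n - 2 * i) (-i) i i).items)
        PySem.Dict.empty)
      = (mainItems n t).foldl (fun d p => d.insert p.1 p.2) PySem.Dict.empty := by
  rw [mainItems, foldl_flatMap_insert]; rfl

theorem mem_mainKeys (n t a b : Int) (_ht : 0 ≤ t) (htn : 2 * t ≤ n) :
    ((a, b) ∈ (mainItems n t).map Prod.fst) ↔
      (0 ≤ min (min a b) (min (n - 1 - a) (n - 1 - b)) ∧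
       min (min a b) (min (n - 1 - a) (n - 1 - b)) < t) := by
  simp only [mainItems, List.map_flatMap, List.mem_flatMap, PySem.List.mem_pyRange_one]
  constructor
  · rintro ⟨i, ⟨h0, h1⟩, h⟩
    have hm : 2 ≤ n - 2 * i := by omega
    rw [mem_spiral_keys _ _ _ _ _ _ hm] at h
    unfold onBorder at h
    omega
  · rintro ⟨h0, h1⟩
    refine ⟨min (min a b) (min (n - 1 - a) (n - 1 - b)), ⟨h0, h1⟩, ?_⟩
    have hm : 2 ≤ n - 2 * min (min a b) (min (n - 1 - a) (n - 1 - b)) := by omega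
    rw [mem_spiral_keys _ _ _ _ _ _ hm]
    unfold onBorder
    omega

theorem mainKeys_nodup (n t : Int) (_ht : 0 ≤ t) (htn : 2 * t ≤ n) :
    ((mainItems n t).map Prod.fst).Nodup := by
  simp only [mainItems, List.map_flatMap]
  rw [List.nodup_flatMap]
  constructor
  · intro i _
    exact spiral_keys_nodup _ _ _ _
  · apply (PySem.List.pairwise_lt_pyRange_one 0 t).imp_of_mem
    intro i j hi hj hij
    rw [PySem.List.mem_pyRange_one] at hi hj
    intro k hki hkj
    obtain ⟨a, b⟩ := k
    rw [mem_spiral_keys _ _ _ _ _ _ (by omega : 2 ≤ n - 2 * i)] at hki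
    rw [mem_spiral_keys _ _ _ _ _ _ (by omega : 2 ≤ n - 2 * j)] at hkj
    unfold onBorder at hki hkj
    omega

theorem main_get (n t a b : Int) (ht : 0 ≤ t) (htn : 2 * t ≤ n) :
    ((PySem.List.pyRange 0 t 1).foldl
        (fun d i => d.update (square_spiral (n - 2 * i) (-i) i i).items)
        PySem.Dict.empty).get? (a, b)
      = (if 0 ≤ min (min a b) (min (n - 1 - a) (n - 1 - b)) ∧
            min (min a b) (min (n - 1 - a) (n - 1 - b)) < t then
          some (sideVal (-(min (min a b) (min (n - 1 - a) (n - 1 - b))))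
            (n - 2 * min (min a b) (min (n - 1 - a) (n - 1 - b)))
            (a - min (min a b) (min (n - 1 - a) (n - 1 - b)))
            (b - min (min a b) (min (n - 1 - a) (n - 1 - b))))
         else none) := by
  rw [mainItems_eq_fold]
  have hitems := PySem.Dict.items_foldl_insert_fresh (mainItems n t) Prod.fst Prod.snd
    PySem.Dict.empty (fun a _ => PySem.Dict.contains_empty _) (mainKeys_nodup n t ht htn)
  have hkeys : ((mainItems n t).foldl (fun d p => d.insert p.1 p.2)
      PySem.Dict.empty).items = mainItems n t := by
    rw [show ((mainItems n t).foldl (fun d p => d.insert p.1 p.2) PySem.Dict.empty)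
        = ((mainItems n t).foldl (fun d a => d.insert a.1 a.2) PySem.Dict.empty) from rfl]
    rw [hitems]
    rw [show (PySem.Dict.empty : PySem.Dict (Int × Int) String).items = [] from rfl]
    simp
  have hnd : ((mainItems n t).foldl (fun d p => d.insert p.1 p.2)
      PySem.Dict.empty).keys.Nodup := by
    have h : ((mainItems n t).foldl (fun d p => d.insert p.1 p.2) PySem.Dict.empty).keys
        = ((mainItems n t).foldl (fun d p => d.insert p.1 p.2) PySem.Dict.empty).items.map
          Prod.fst := rfl
    rw [h, hkeys]
    exact mainKeys_nodup n t ht htn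
  set i := min (min a b) (min (n - 1 - a) (n - 1 - b)) with hidef
  by_cases h : 0 ≤ i ∧ i < t
  · rw [if_pos h]
    have hmem : (a, b) ∈ (mainItems n t).map Prod.fst :=
      (mem_mainKeys n t a b ht htn).mpr h
    obtain ⟨p, hp, hpk⟩ := List.mem_map.mp hmem
    -- p is in some ring's items; identify the ring and the value
    have hp' := hp
    simp only [mainItems, List.mem_flatMap, PySem.List.mem_pyRange_one] at hp'
    obtain ⟨j, ⟨hj0, hj1⟩, hpj⟩ := hp'
    have hmj : 2 ≤ n - 2 * j := by omega
    rw [spiral_items] at hpj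
    obtain ⟨q, hq, hqe⟩ := List.mem_map.mp hpj
    have hqv := quadItems_val _ _ hmj q hq
    have hqk : (q.1 ∈ (quadItems (n - 2 * j) (-j)).map Prod.fst) :=
      List.mem_map.mpr ⟨q, hq, rfl⟩
    obtain ⟨⟨q1, q2⟩, qv⟩ := q
    rw [mem_quadKeys] at hqk
    obtain ⟨⟨pa, pb⟩, pv⟩ := p
    simp only [Prod.mk.injEq] at hpk hqe
    dsimp only at hqv hpk
    have hpmem : ((a, b), pv) ∈ ((mainItems n t).foldl (fun d p => d.insert p.1 p.2)
        PySem.Dict.empty).items := by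
      rw [hkeys]
      rw [show ((a, b), pv) = ((pa, pb), pv) from by
        simp only [Prod.mk.injEq]; exact ⟨⟨hpk.1.symm, hpk.2.symm⟩, trivial⟩]
      exact hp
    rw [PySem.Dict.get?_of_mem_items _ hpmem hnd]
    have hji : j = i := by omega
    have he1 : (-j : Int) = -i := by omega
    have he2 : n - 2 * j = n - 2 * i := by omega
    have he3 : q1 = a - i := by omega
    have he4 : q2 = b - i := by omega
    rw [← hqe.2, hqv, he1, he2, he3, he4]
  · rw [if_neg h]
    rw [PySem.Dict.get?_eq_none_iff_not_mem_keys]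
    intro hmem
    have hk : (a, b) ∈ (mainItems n t).map Prod.fst := by
      have hkk : ((mainItems n t).foldl (fun d p => d.insert p.1 p.2)
          PySem.Dict.empty).keys = (mainItems n t).map Prod.fst := by
        rw [show ((mainItems n t).foldl (fun d p => d.insert p.1 p.2)
            PySem.Dict.empty).keys = ((mainItems n t).foldl (fun d p => d.insert p.1 p.2)
            PySem.Dict.empty).items.map Prod.fst from rfl, hkeys]
      rw [hkk] at hmem
      exact hmem
    rw [mem_mainKeys n t a b ht htn] at hk
    exact h hk

theorem truncdiv_two (n : Int) (h : 0 ≤ n) : PySem.Int.truncdiv n 2 = n / 2 := by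
  simp [PySem.Int.truncdiv]
  rw [Int.tdiv_eq_ediv_of_nonneg h]

theorem pymod_two (n : Int) : PySem.Int.mod n 2 = n % 2 := by
  simp [PySem.Int.mod]
  rw [Int.fmod_eq_emod]
  omega

theorem cellB_ring (n r c : Int)
    (h : n - 2 * min (min r c) (min (n - 1 - r) (n - 1 - c)) ≠ 1) :
    cellB n r c = sideVal (-(min (min r c) (min (n - 1 - r) (n - 1 - c))))
      (n - 2 * min (min r c) (min (n - 1 - r) (n - 1 - c)))
      (r - min (min r c) (min (n - 1 - r) (n - 1 - c)))
      (c - min (min r c) (min (n - 1 - r) (n - 1 - c))) := by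
  simp only [cellB, sideVal]
  rw [if_neg h]
  rfl

theorem cellB_center (n r c : Int)
    (h : n - 2 * min (min r c) (min (n - 1 - r) (n - 1 - c)) = 1) :
    cellB n r c = "Z" := by
  simp only [cellB]
  rw [if_pos h]

theorem cell_eq (n r c : Int) (hr : 0 ≤ r) (hrn : r < n) (hc : 0 ≤ c) (hcn : c < n) :
    (if PySem.Int.mod n 2 = 1
     then ((PySem.List.pyRange 0 (PySem.Int.truncdiv n 2) 1).foldl
        (fun d i => d.update (square_spiral (n - 2 * i) (-i) i i).items)
        PySem.Dict.empty).insert (PySem.Int.truncdiv n 2, PySem.Int.truncdiv n 2) "Z"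
     else ((PySem.List.pyRange 0 (PySem.Int.truncdiv n 2) 1).foldl
        (fun d i => d.update (square_spiral (n - 2 * i) (-i) i i).items)
        PySem.Dict.empty)).getD (r, c) " " = cellB n r c := by
  have hn : 0 < n := by omega
  have htd : PySem.Int.truncdiv n 2 = n / 2 := truncdiv_two n (by omega)
  have hget := main_get n (n / 2) r c (by omega) (by omega)
  rw [htd]
  set i := min (min r c) (min (n - 1 - r) (n - 1 - c)) with hidef
  have hi0 : 0 ≤ i := by omega
  have hi1 : 2 * i ≤ n - 1 := by omega
  by_cases hm1 : 2 * i ≤ n - 2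
  · -- interior ring cell: covered by spiral i of the main loop
    have hit : (0 ≤ i ∧ i < n / 2) := ⟨hi0, by omega⟩
    rw [cellB_ring n r c (by omega)]
    by_cases hodd : PySem.Int.mod n 2 = 1
    · rw [if_pos hodd]
      have hoddm : n % 2 = 1 := by rw [← pymod_two]; exact hodd
      have hne : ((r, c) : Int × Int) ≠ (n / 2, n / 2) := by
        intro he
        rw [Prod.mk.injEq] at he
        omega
      rw [PySem.Dict.getD_eq_get?_getD, PySem.Dict.get?_insert, if_neg hne, hget,
        if_pos hit]
      rfl
    · rw [if_neg hodd, PySem.Dict.getD_eq_get?_getD, hget, if_pos hit]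
      rfl
  · -- the centre cell of an odd board
    have hm : 2 * i = n - 1 := by omega
    have hrc : r = i ∧ c = i := by omega
    have hoddm : n % 2 = 1 := by omega
    have hodd : PySem.Int.mod n 2 = 1 := by rw [pymod_two]; omega
    rw [if_pos hodd]
    have hkey : ((r, c) : Int × Int) = (n / 2, n / 2) := by
      rw [Prod.mk.injEq]
      omega
    rw [PySem.Dict.getD_eq_get?_getD, PySem.Dict.get?_insert, if_pos hkey]
    rw [cellB_center n r c (by omega)]
    rfl

theorem str_append_assoc (a b c : String) : (a ++ b) ++ c = a ++ (b ++ c) := by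
  apply String.ext
  simp

theorem str_append_empty (s : String) : s ++ "" = s := by
  apply String.ext
  simp

theorem str_empty_append (s : String) : "" ++ s = s := by
  apply String.ext
  simp

theorem intersperse_nil_flatten (l : List (List Char)) :
    (List.intersperse ([] : List Char) l).flatten = l.flatten := by
  induction l with
  | nil => rfl
  | cons a l ih =>
    cases l with
    | nil => simp
    | cons b t => simp_all [List.intersperse]

theorem join_cons (x : String) (parts : List String) :
    PySem.Str.join "" (x :: parts) = x ++ PySem.Str.join "" parts := by
  apply String.ext
  simp [PySem.Str.join, PySem.Chars.join, List.intercalate, intersperse_nil_flatten]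

theorem foldl_append_join (l : List Int) (f : Int → String) (s : String) :
    l.foldl (fun s x => s ++ f x) s = s ++ PySem.Str.join "" (l.map f) := by
  induction l generalizing s with
  | nil => rw [List.foldl_nil, List.map_nil, show PySem.Str.join "" [] = "" from rfl,
      str_append_empty]
  | cons x l ih =>
    rw [List.foldl_cons, List.map_cons, ih, join_cons, str_append_assoc]

theorem build_string (n : Int) (g : Int → Int → String) :
    (PySem.List.pyRange 0 n 1).foldl (fun s r =>
      ((PySem.List.pyRange 0 n 1).foldl (fun s c => s ++ g r c) s) ++ "\n") ""
    = PySem.Str.join "" ((PySem.List.pyRange 0 n 1).map (fun r =>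
        PySem.Str.join "" ((PySem.List.pyRange 0 n 1).map (fun c => g r c)) ++ "\n")) := by
  have hstep : (fun (s : String) (r : Int) =>
      ((PySem.List.pyRange 0 n 1).foldl (fun s c => s ++ g r c) s) ++ "\n")
      = (fun (s : String) (r : Int) =>
        s ++ (PySem.Str.join "" ((PySem.List.pyRange 0 n 1).map (fun c => g r c)) ++ "\n")) := by
    funext s r
    rw [foldl_append_join, str_append_assoc]
  rw [hstep, foldl_append_join (f := fun r =>
    PySem.Str.join "" ((PySem.List.pyRange 0 n 1).map (fun c => g r c)) ++ "\n"),
    str_empty_append]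

-- ===== VERDICT (by name: the statement is the Claim_ definition above) =====
theorem widdershins_spec : Claim_equal_widdershins := by
  intro n _
  show widdershins n = widdershins_alt n
  simp only [widdershins, widdershins_alt]
  rw [build_string]
  refine congrArg _ (List.map_congr_left ?_)
  intro r hr
  rw [PySem.List.mem_pyRange_one] at hr
  refine congrArg (fun t => t ++ "\n") (congrArg _ (List.map_congr_left ?_))
  intro c hc
  rw [PySem.List.mem_pyRange_one] at hc
  exact cell_eq n r c hr.1 hr.2 hc.1 hc.2
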